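-- pv_equiv track=rewrite | github.com/yannickloth/W33-Theory | pillars/THEORY_PART_CCXXVII_HETEROTIC_STRING.py | delta_coefficients
-- ===== SOURCE A (Python) =====
-- from math import comb, factorial
--
-- def delta_coefficients(num_terms=20):
--     """
--     Delta(q) = q * prod(1-q^n)^24 = sum tau(n) q^n.
--     Ramanujan tau function.
--     """
--     max_prod = num_terms - 1
--     prod = [0] * (max_prod + 1)
--     prod[0] = 1
--
--     for n in range(1, max_prod + 1):
--         new = [0] * (max_prod + 1)
--         for i in range(max_prod + 1):
--             if prod[i] == 0:
--                 continue
--             for k in range(25):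
--                 j = i + k * n
--                 if j > max_prod:
--                     break
--                 new[j] += prod[i] * comb(24, k) * ((-1) ** k)
--         prod = new
--
--     delta = [0] * num_terms
--     for i in range(min(max_prod + 1, num_terms - 1)):
--         delta[i + 1] = prod[i]
--
--     return delta
-- ===== SOURCE B (Python) =====
-- def delta_coefficients(num_terms=20):
--     """
--     Delta(q) = q * prod(1-q^n)^24 = sum tau(n) q^n, truncated.
--     Multiplies by each factor (1 - q^n) 24 times via in-place shifted
--     subtraction (no binomial coefficients, no scratch list per step).
--     """
--     max_prod = num_terms - 1
--     prod = [0] * (max_prod + 1)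
--     prod[0] = 1
--     for n in range(1, max_prod + 1):
--         for _ in range(24):
--             for j in range(max_prod, n - 1, -1):
--                 prod[j] -= prod[j - n]
--     return [0] + prod[:num_terms - 1]
-- ===== Notes on version B (the rewrite author's own statement) =====
-- stated objective: alternative
-- what changed: Replaces the per-factor binomial convolution (scatter loop with comb(24,k) terms into a fresh list) by multiplying in place by (1 - q^n) twenty-four times via a downward shifted subtraction; Pre_ excludes num_terms <= 0, where both implementations raise IndexError on prod[0]=1.
import Mathlib
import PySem

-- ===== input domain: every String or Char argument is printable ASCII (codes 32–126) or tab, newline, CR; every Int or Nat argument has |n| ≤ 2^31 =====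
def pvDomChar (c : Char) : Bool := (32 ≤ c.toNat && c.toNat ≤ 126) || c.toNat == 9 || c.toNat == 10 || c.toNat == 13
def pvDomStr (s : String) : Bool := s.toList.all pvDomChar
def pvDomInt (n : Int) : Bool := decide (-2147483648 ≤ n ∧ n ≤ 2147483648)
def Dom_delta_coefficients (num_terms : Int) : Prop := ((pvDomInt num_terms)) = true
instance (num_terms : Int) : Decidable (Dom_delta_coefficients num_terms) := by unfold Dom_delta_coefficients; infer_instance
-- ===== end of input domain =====

-- B multiplies in place by (1 - q^n) twenty-four times via downward shifted subtraction,
-- instead of A's binomial-coefficient convolution into a fresh list per factor (objective: alternative).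

-- ===== PORT A =====
-- inner `for k in range(25): j = i + k*n; if j > max_prod: break; new[j] += ...` (fuel = 25)
def pvA_kloop (m n i : Nat) (pi : Int) : Nat → Nat → List Int → List Int
  | _, 0, new => new
  | k, fuel+1, new =>
    let j := i + k * n
    if j > m then new
    else pvA_kloop m n i pi (k+1) fuel
      (new.set j (new.getD j 0 + pi * (Nat.choose 24 k : Int) * (-1)^k))

-- one pass of the outer `for n`: builds `new` from `prod`
def pvA_step (m n : Nat) (prod : List Int) : List Int :=
  (List.range (m+1)).foldl
    (fun new i => if prod.getD i 0 = 0 then new else pvA_kloop m n i (prod.getD i 0) 0 25 new)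
    (List.replicate (m+1) 0)

def delta_coefficients (num_terms : Int) : List Int :=
  let m := (num_terms - 1).toNat
  let prod0 := (List.replicate (m+1) 0).set 0 1
  let prod := (List.range' 1 m).foldl (fun prod n => pvA_step m n prod) prod0
  (List.range (min (m+1) m)).foldl
    (fun d i => d.set (i+1) (prod.getD i 0))
    (List.replicate num_terms.toNat 0)

-- ===== PORT B =====
-- `for j in range(max_prod, n-1, -1): prod[j] -= prod[j-n]`; cnt counts the remaining j's,
-- current j = n + cnt - 1 (downward)
def pvB_down (n : Nat) : Nat → List Int → List Int
  | 0, prod => prod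
  | cnt+1, prod =>
    let j := n + cnt
    pvB_down n cnt (prod.set j (prod.getD j 0 - prod.getD (j - n) 0))

def pvB_step (m n : Nat) (prod : List Int) : List Int :=
  (List.range 24).foldl (fun p _ => pvB_down n (m + 1 - n) p) prod

def delta_coefficients_alt (num_terms : Int) : List Int :=
  let m := (num_terms - 1).toNat
  let prod0 := (List.replicate (m+1) 0).set 0 1
  let prod := (List.range' 1 m).foldl (fun prod n => pvB_step m n prod) prod0
  0 :: prod.take m

-- ===== PRECONDITION & SPEC =====
-- Pre_ excludes num_terms ≤ 0, where both A and B raise IndexError on `prod[0] = 1`.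
def Pre_delta_coefficients (num_terms : Int) : Prop := 1 ≤ num_terms
instance (num_terms : Int) : Decidable (Pre_delta_coefficients num_terms) := by
  unfold Pre_delta_coefficients; infer_instance

def pvWitness_delta_coefficients : Int := 6

def Spec_delta_coefficients (num_terms : Int) (out : List Int) : Prop := out = delta_coefficients_alt num_terms
instance (num_terms : Int) (out : List Int) : Decidable (Spec_delta_coefficients num_terms out) := by unfold Spec_delta_coefficients; infer_instance

-- ===== CLAIM (what is proved, stated in full; the proofs are below) =====
def Claim_equal_delta_coefficients : Prop := ∀ (num_terms : Int), Dom_delta_coefficients num_terms → Pre_delta_coefficients num_terms → Spec_delta_coefficients num_terms (delta_coefficients num_terms)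

-- ===== LEMMAS AND PROOFS =====

-- abbreviation for the common gather sum: Σ_{k<t+1, k*n ≤ j} (-1)^k C(t,k) c(j-k*n)
def pvGather (t n j : Nat) (c : Nat → Int) : Int :=
  ∑ k ∈ Finset.range (t+1), (if k * n ≤ j then (-1)^k * (Nat.choose t k : Int) * c (j - k*n) else 0)

-- ---- generic list facts ----
theorem pv_getD_set (l : List Int) (i j : Nat) (v : Int) :
    (l.set i v).getD j 0 = if i = j ∧ j < l.length then v else l.getD j 0 := by
  by_cases hij : i = j
  · subst hij
    by_cases hl : i < l.length
    · simp [List.getD, hl]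
    · simp [List.getD, hl]
  · simp [List.getD, List.getElem?_set_ne hij, hij]

-- ---- A-side characterization ----
theorem pvA_kloop_length (m n i : Nat) (pi : Int) (k fuel : Nat) (new : List Int) :
    (pvA_kloop m n i pi k fuel new).length = new.length := by
  induction fuel generalizing k new with
  | zero => rfl
  | succ f ih =>
    simp only [pvA_kloop]
    split
    · rfl
    · rw [ih]; simp

theorem pvA_kloop_getD (m n i : Nat) (pi : Int) (fuel k j : Nat) (new : List Int)
    (hj : j ≤ m) (hlen : new.length = m + 1) :
    (pvA_kloop m n i pi k fuel new).getD j 0 =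
      new.getD j 0 + ∑ t ∈ Finset.range fuel,
        (if i + (k+t) * n = j then pi * (Nat.choose 24 (k+t) : Int) * (-1)^(k+t) else 0) := by
  induction fuel generalizing k new with
  | zero => simp [pvA_kloop]
  | succ f ih =>
    simp only [pvA_kloop]
    split
    · rename_i hbig
      have hz : ∀ t ∈ Finset.range (f+1),
          (if i + (k+t) * n = j then pi * (Nat.choose 24 (k+t) : Int) * (-1)^(k+t) else 0) = 0 := by
        intro t _
        have : i + (k+t) * n ≠ j := by
          intro h; apply absurd hj; push Not
          have : i + k * n ≤ i + (k+t) * n := by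
            have : k * n ≤ (k+t) * n := Nat.mul_le_mul_right n (by omega)
            omega
          omega
        simp [this]
      rw [Finset.sum_eq_zero hz]; ring
    · rename_i hle
      push Not at hle
      set new' := new.set (i + k*n) (new.getD (i+k*n) 0 + pi * (Nat.choose 24 k : Int) * (-1)^k) with hnew'
      rw [ih (k+1) new' (by rw [hnew']; simp [hlen])]
      have hgd : new'.getD j 0 = new.getD j 0 +
          (if i + k * n = j then pi * (Nat.choose 24 k : Int) * (-1)^k else 0) := by
        rw [hnew', pv_getD_set]
        by_cases h : i + k * n = j
        · simp [h, hlen, Nat.lt_succ_of_le hj]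
        · simp [h]
      rw [hgd]
      rw [Finset.sum_range_succ' (fun t => if i + (k+t) * n = j then pi * (Nat.choose 24 (k+t) : Int) * (-1)^(k+t) else 0)]
      have he : ∀ t, k + 1 + t = k + (t + 1) := by omega
      simp only [he, Nat.add_zero]
      ring

theorem pv_foldl_length {α : Type} (f : List Int → α → List Int)
    (h : ∀ acc x, (f acc x).length = acc.length) :
    ∀ (L : List α) (init : List Int), (L.foldl f init).length = init.length
  | [], _ => rfl
  | x :: L, init => by rw [List.foldl_cons, pv_foldl_length f h L _, h]

theorem pv_getD_replicate (k j : Nat) : (List.replicate k (0:Int)).getD j 0 = 0 := by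
  rcases Nat.lt_or_ge j k with h | h
  · simp [List.getD, h]
  · have hx : (List.replicate k (0:Int))[j]? = none := List.getElem?_eq_none_iff.2 (by simpa using h)
    simp [List.getD, hx]

theorem pv_list_eq (l1 l2 : List Int) (hlen : l1.length = l2.length)
    (h : ∀ j, j < l1.length → l1.getD j 0 = l2.getD j 0) : l1 = l2 := by
  apply List.ext_getElem hlen
  intro i h1 h2
  have := h i h1
  rwa [List.getD_eq_getElem l1 0 h1, List.getD_eq_getElem l2 0 h2] at this

-- ---- A-side fold characterization ----
theorem pvA_fold_getD (m n : Nat) (prod : List Int) (w : Nat) :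
    (((List.range w).foldl
        (fun new i => if prod.getD i 0 = 0 then new else pvA_kloop m n i (prod.getD i 0) 0 25 new)
        (List.replicate (m+1) 0)).length = m+1) ∧
    ∀ j, j ≤ m →
      ((List.range w).foldl
        (fun new i => if prod.getD i 0 = 0 then new else pvA_kloop m n i (prod.getD i 0) 0 25 new)
        (List.replicate (m+1) 0)).getD j 0 =
      ∑ i ∈ Finset.range w, ∑ k ∈ Finset.range 25,
        (if i + k*n = j then prod.getD i 0 * (Nat.choose 24 k : Int) * (-1)^k else 0) := by
  induction w with
  | zero =>
    refine ⟨by simp, fun j hj => ?_⟩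
    simp [pv_getD_replicate]
  | succ w ih =>
    rw [List.range_succ, List.foldl_append, List.foldl_cons, List.foldl_nil]
    by_cases hz : prod.getD w 0 = 0
    · rw [if_pos hz]
      refine ⟨ih.1, fun j hj => ?_⟩
      rw [ih.2 j hj, Finset.sum_range_succ (fun i => ∑ k ∈ Finset.range 25,
        (if i + k*n = j then prod.getD i 0 * (Nat.choose 24 k : Int) * (-1)^k else 0))]
      have hzero : ∑ k ∈ Finset.range 25,
          (if w + k*n = j then prod.getD w 0 * (Nat.choose 24 k : Int) * (-1)^k else 0) = 0 := by
        apply Finset.sum_eq_zero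
        intro k _
        rw [hz]
        split <;> ring
      rw [hzero, add_zero]
    · rw [if_neg hz]
      refine ⟨by rw [pvA_kloop_length, ih.1], fun j hj => ?_⟩
      rw [pvA_kloop_getD m n w (prod.getD w 0) 25 0 j _ hj ih.1, ih.2 j hj,
        Finset.sum_range_succ (fun i => ∑ k ∈ Finset.range 25,
          (if i + k*n = j then prod.getD i 0 * (Nat.choose 24 k : Int) * (-1)^k else 0))]
      simp only [Nat.zero_add]

theorem pv_scatter_eq_gather (m n j : Nat) (c : Nat → Int) (hj : j ≤ m) :
    (∑ i ∈ Finset.range (m+1), ∑ k ∈ Finset.range 25,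
       (if i + k*n = j then c i * (Nat.choose 24 k : Int) * (-1)^k else 0)) =
    pvGather 24 n j c := by
  rw [Finset.sum_comm]
  unfold pvGather
  apply Finset.sum_congr rfl
  intro k _
  by_cases hk : k * n ≤ j
  · have hiff : ∀ i, (i + k*n = j) ↔ (i = j - k*n) := by
      intro i
      constructor <;> intro h <;> omega
    calc (∑ i ∈ Finset.range (m+1), (if i + k*n = j then c i * (Nat.choose 24 k : Int) * (-1)^k else 0))
        = ∑ i ∈ Finset.range (m+1), (if i = j - k*n then c i * (Nat.choose 24 k : Int) * (-1)^k else 0) := by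
          apply Finset.sum_congr rfl
          intro i _
          simp only [hiff i]
      _ = (if j - k*n ∈ Finset.range (m+1) then c (j-k*n) * (Nat.choose 24 k : Int) * (-1)^k else 0) :=
          Finset.sum_ite_eq' (Finset.range (m+1)) (j - k*n) _
      _ = (if k * n ≤ j then (-1)^k * (Nat.choose 24 k : Int) * c (j - k*n) else 0) := by
          rw [if_pos (Finset.mem_range.2 (by omega)), if_pos hk]
          ring
  · rw [if_neg hk]
    apply Finset.sum_eq_zero
    intro i _
    rw [if_neg (by omega)]

theorem pvA_step_getD (m n j : Nat) (prod : List Int)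
    (hj : j ≤ m) :
    (pvA_step m n prod).getD j 0 = pvGather 24 n j (fun i => prod.getD i 0) := by
  unfold pvA_step
  rw [(pvA_fold_getD m n prod (m+1)).2 j hj]
  exact pv_scatter_eq_gather m n j _ hj

theorem pvA_step_length (m n : Nat) (prod : List Int) :
    (pvA_step m n prod).length = m + 1 :=
  (pvA_fold_getD m n prod (m+1)).1

-- ---- Pascal step on the gather sum ----
theorem pvGather_of_lt (t n j : Nat) (c : Nat → Int) (hj : j < n) :
    pvGather t n j c = c j := by
  unfold pvGather
  rw [Finset.sum_eq_single 0]
  · simp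
  · intro b _ hb
    have hb' : ¬ b * n ≤ j := by
      have := Nat.le_mul_of_pos_left n (Nat.pos_of_ne_zero hb)
      omega
    simp [hb']
  · intro h
    simp at h

theorem pvGather_succ (t n j : Nat) (c : Nat → Int) :
    pvGather (t+1) n j c =
      if n ≤ j then pvGather t n j c - pvGather t n (j-n) c else pvGather t n j c := by
  by_cases hnj : n ≤ j
  case neg =>
    rw [if_neg hnj, pvGather_of_lt _ _ _ _ (by omega), pvGather_of_lt _ _ _ _ (by omega)]
  rw [if_pos hnj]
  unfold pvGather
  rw [Finset.sum_range_succ']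
  have hterm : ∀ k,
      (if (k+1) * n ≤ j then (-1)^(k+1) * (Nat.choose (t+1) (k+1) : Int) * c (j - (k+1)*n) else 0)
      = (if k * n ≤ j - n then -((-1)^k * (Nat.choose t k : Int) * c (j - n - k*n)) else 0)
        + (if (k+1) * n ≤ j then (-1)^(k+1) * (Nat.choose t (k+1) : Int) * c (j - (k+1)*n) else 0) := by
    intro k
    have hmul : (k+1) * n = k * n + n := by ring
    by_cases h1 : (k+1) * n ≤ j
    · have h2 : k * n ≤ j - n := by rw [hmul] at h1; omega
      have h3 : j - (k+1)*n = j - n - k*n := by rw [hmul]; omega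
      rw [if_pos h1, if_pos h2, if_pos h1, h3]
      have hc : (Nat.choose (t+1) (k+1) : Int) = (Nat.choose t k : Int) + (Nat.choose t (k+1) : Int) := by
        rw [Nat.choose_succ_succ]
        push_cast
        ring
      rw [hc, pow_succ]
      ring
    · have h2 : ¬ k * n ≤ j - n := by rw [hmul] at h1; omega
      rw [if_neg h1, if_neg h2, if_neg h1, add_zero]
  rw [Finset.sum_congr rfl (fun k _ => hterm k), Finset.sum_add_distrib]
  have hneg : (∑ k ∈ Finset.range (t+1),
      (if k * n ≤ j - n then -((-1)^k * (Nat.choose t k : Int) * c (j - n - k*n)) else 0))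
      = - pvGather t n (j-n) c := by
    unfold pvGather
    rw [← Finset.sum_neg_distrib]
    apply Finset.sum_congr rfl
    intro k _
    split <;> simp
  unfold pvGather at hneg
  rw [hneg]
  have hsecond : (∑ k ∈ Finset.range (t+1),
      (if (k+1) * n ≤ j then (-1)^(k+1) * (Nat.choose t (k+1) : Int) * c (j - (k+1)*n) else 0))
      + (if 0 * n ≤ j then (-1)^0 * (Nat.choose (t+1) 0 : Int) * c (j - 0*n) else 0)
      = pvGather t n j c := by
    rw [Finset.sum_range_succ]
    have hlast : (if (t+1) * n ≤ j then (-1)^(t+1) * (Nat.choose t (t+1) : Int) * c (j - (t+1)*n) else 0) = 0 := by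
      rw [Nat.choose_succ_self]
      split <;> simp
    rw [hlast, add_zero]
    conv_rhs => rw [pvGather, Finset.sum_range_succ']
    simp
  unfold pvGather at hsecond
  linarith [hsecond]

theorem pvB_down_length (n cnt : Nat) (prod : List Int) :
    (pvB_down n cnt prod).length = prod.length := by
  induction cnt generalizing prod with
  | zero => rfl
  | succ c ih => simp only [pvB_down]; rw [ih]; simp

theorem pvB_down_getD (n cnt j : Nat) (prod : List Int) (hj : j < prod.length) :
    (pvB_down n cnt prod).getD j 0 =
      if n ≤ j ∧ j < n + cnt then prod.getD j 0 - prod.getD (j-n) 0 else prod.getD j 0 := by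
  induction cnt generalizing prod with
  | zero =>
    have h0 : ¬(n ≤ j ∧ j < n + 0) := by omega
    rw [if_neg h0]
    rfl
  | succ c ih =>
    simp only [pvB_down]
    rw [ih _ (by simp [hj])]
    by_cases hcase : n ≤ j ∧ j < n + c
    · rw [if_pos hcase, if_pos (show n ≤ j ∧ j < n+(c+1) by omega)]
      rw [pv_getD_set, if_neg (by omega), pv_getD_set, if_neg (by omega)]
    · by_cases hj0j : j = n + c
      · subst hj0j
        rw [if_neg hcase, if_pos (show n ≤ n+c ∧ n+c < n+(c+1) by omega)]
        rw [pv_getD_set, if_pos ⟨rfl, hj⟩]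
      · rw [if_neg hcase, if_neg (show ¬(n ≤ j ∧ j < n+(c+1)) by omega)]
        rw [pv_getD_set, if_neg (by omega)]

-- ---- B-side characterization ----
theorem pvB_step_length (m n : Nat) (prod : List Int) :
    (pvB_step m n prod).length = prod.length := by
  unfold pvB_step
  exact pv_foldl_length _ (fun acc _ => pvB_down_length n (m+1-n) acc) _ _

theorem pvB_iter_getD (m n : Nat) (prod : List Int)
    (hnm : n ≤ m) (hlen : prod.length = m + 1) (t : Nat) :
    ∀ j, j ≤ m →
      ((List.range t).foldl (fun p _ => pvB_down n (m+1-n) p) prod).getD j 0 =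
        pvGather t n j (fun i => prod.getD i 0) := by
  induction t with
  | zero =>
    intro j hj
    simp [pvGather]
  | succ t ih =>
    intro j hj
    rw [List.range_succ, List.foldl_append, List.foldl_cons, List.foldl_nil]
    have hlen' : ((List.range t).foldl (fun p _ => pvB_down n (m+1-n) p) prod).length = m+1 := by
      rw [pv_foldl_length _ (fun acc _ => pvB_down_length n (m+1-n) acc), hlen]
    rw [pvB_down_getD n (m+1-n) j _ (by omega)]
    have hwin : n + (m+1-n) = m+1 := by omega
    rw [pvGather_succ]
    by_cases hc : n ≤ j
    · rw [if_pos (by omega : n ≤ j ∧ j < n + (m+1-n)), if_pos hc, ih j hj, ih (j-n) (by omega)]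
    · rw [if_neg (by omega : ¬(n ≤ j ∧ j < n + (m+1-n))), if_neg hc, ih j hj]

theorem pvB_step_getD (m n j : Nat) (prod : List Int)
    (hnm : n ≤ m) (hj : j ≤ m) (hlen : prod.length = m + 1) :
    (pvB_step m n prod).getD j 0 = pvGather 24 n j (fun i => prod.getD i 0) := by
  unfold pvB_step
  exact pvB_iter_getD m n prod hnm hlen 24 j hj

-- ---- steps agree, folds agree ----
theorem pv_step_eq (m n : Nat) (prod : List Int) (hnm : n ≤ m) (hlen : prod.length = m+1) :
    pvA_step m n prod = pvB_step m n prod := by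
  apply pv_list_eq
  · rw [pvA_step_length, pvB_step_length, hlen]
  · intro j hj
    rw [pvA_step_length] at hj
    rw [pvA_step_getD m n j prod (by omega), pvB_step_getD m n j prod hnm (by omega) hlen]

theorem pv_fold_eq_aux (m : Nat) (L : List Nat) (hL : ∀ n ∈ L, n ≤ m) :
    ∀ (acc : List Int), acc.length = m+1 →
      L.foldl (fun prod n => pvA_step m n prod) acc = L.foldl (fun prod n => pvB_step m n prod) acc := by
  induction L with
  | nil => intro acc _; rfl
  | cons n L ih =>
    intro acc hacc
    rw [List.foldl_cons, List.foldl_cons,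
        pv_step_eq m n acc (hL n (by simp)) hacc]
    exact ih (fun x hx => hL x (by simp [hx])) _ (by rw [pvB_step_length, hacc])

theorem pv_fold_eq (m : Nat) :
    (List.range' 1 m).foldl (fun prod n => pvA_step m n prod) ((List.replicate (m+1) 0).set 0 1) =
    (List.range' 1 m).foldl (fun prod n => pvB_step m n prod) ((List.replicate (m+1) 0).set 0 1) := by
  apply pv_fold_eq_aux
  · intro n hn
    have := List.mem_range'_1.1 hn
    omega
  · simp

-- ---- final extraction ----
theorem pv_extract_aux (m : Nat) (prod : List Int) :
    ∀ w, w ≤ m →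
      (((List.range w).foldl (fun d i => d.set (i+1) (prod.getD i 0)) (List.replicate (m+1) 0)).length = m+1) ∧
      ∀ j, ((List.range w).foldl (fun d i => d.set (i+1) (prod.getD i 0)) (List.replicate (m+1) 0)).getD j 0 =
        if 1 ≤ j ∧ j ≤ w then prod.getD (j-1) 0 else 0 := by
  intro w
  induction w with
  | zero =>
    intro _
    simp only [List.range_zero, List.foldl_nil]
    refine ⟨by simp, fun j => ?_⟩
    rw [if_neg (by omega), pv_getD_replicate]
  | succ w ih =>
    intro hw
    obtain ⟨ihl, ihg⟩ := ih (by omega)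
    rw [List.range_succ, List.foldl_append, List.foldl_cons, List.foldl_nil]
    refine ⟨by rw [List.length_set, ihl], fun j => ?_⟩
    rw [pv_getD_set, ihl]
    by_cases hj : j = w + 1
    · rw [if_pos ⟨hj.symm, by omega⟩, if_pos (by omega)]
      rw [hj]
      simp
    · rw [if_neg (by omega), ihg j]
      by_cases h1 : 1 ≤ j ∧ j ≤ w
      · rw [if_pos h1, if_pos (by omega)]
      · rw [if_neg h1, if_neg (by omega)]

theorem pv_extract (m : Nat) (prod : List Int) (hlen : prod.length = m+1) :
    (List.range m).foldl (fun d i => d.set (i+1) (prod.getD i 0)) (List.replicate (m+1) 0) =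
      0 :: prod.take m := by
  obtain ⟨hl, hg⟩ := pv_extract_aux m prod m (le_refl m)
  apply pv_list_eq
  · rw [hl]
    simp [hlen]
  · intro j hj
    rw [hl] at hj
    rw [hg j]
    match j with
    | 0 => rw [if_neg (by omega)]; rfl
    | j+1 =>
      rw [if_pos (by omega)]
      have hjm : j < m := by omega
      simp only [Nat.add_sub_cancel]
      show prod.getD j 0 = (prod.take m).getD j 0
      simp [List.getD, hjm]

-- ===== VERDICT (by name: the statement is the Claim_ definition above) =====
theorem delta_coefficients_spec : Claim_equal_delta_coefficients := by
  unfold Claim_equal_delta_coefficients Spec_delta_coefficients Pre_delta_coefficients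
  intro num_terms hdom hpre
  unfold delta_coefficients delta_coefficients_alt
  simp only []
  rw [pv_fold_eq]
  have hlen : ((List.range' 1 ((num_terms-1).toNat)).foldl
      (fun prod n => pvB_step ((num_terms-1).toNat) n prod)
      ((List.replicate ((num_terms-1).toNat+1) 0).set 0 1)).length = (num_terms-1).toNat + 1 := by
    rw [pv_foldl_length _ (fun acc n => pvB_step_length ((num_terms-1).toNat) n acc)]
    simp
  have hnt : num_terms.toNat = (num_terms-1).toNat + 1 := by omega
  rw [hnt, Nat.min_eq_right (Nat.le_succ _)]
  exact pv_extract _ _ hlen
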